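-- pv_equiv track=rewrite | github.com/MihaiAC/algorithms-and-data-structures | practice/LC_Python/24Game.py | insert_signs
-- ===== SOURCE A (Python) =====
-- def insert_signs(expr, signs):
--     out = []
--     op_index = 0
--
--     for idx, token in enumerate(expr):
--         out.append(token)
--
--         if op_index < len(signs):
--             if (token != '(') and (idx + 1 == len(expr) or expr[idx + 1] != ")"):
--                 out.append(signs[op_index])
--                 op_index += 1
--
--     return out
-- ===== SOURCE B (Python) =====
-- def insert_signs(expr, signs):
--     n = len(expr)
--     eligible = [i for i, tok in enumerate(expr)
--                 if tok != '(' and (i + 1 == n or expr[i + 1] != ')')]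
--     sign_at = dict(zip(eligible, signs))
--     return [piece
--             for i, tok in enumerate(expr)
--             for piece in ([tok, sign_at[i]] if i in sign_at else [tok])]
-- ===== Notes on version B (the rewrite author's own statement) =====
-- stated objective: alternative
-- what changed: Replaced A's single stateful loop (op_index counter consumed while emitting) by two staged passes: first compute the eligible positions and map the signs onto them with dict(zip(eligible, signs)), then emit the output by per-position dictionary lookup.
import Mathlib
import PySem

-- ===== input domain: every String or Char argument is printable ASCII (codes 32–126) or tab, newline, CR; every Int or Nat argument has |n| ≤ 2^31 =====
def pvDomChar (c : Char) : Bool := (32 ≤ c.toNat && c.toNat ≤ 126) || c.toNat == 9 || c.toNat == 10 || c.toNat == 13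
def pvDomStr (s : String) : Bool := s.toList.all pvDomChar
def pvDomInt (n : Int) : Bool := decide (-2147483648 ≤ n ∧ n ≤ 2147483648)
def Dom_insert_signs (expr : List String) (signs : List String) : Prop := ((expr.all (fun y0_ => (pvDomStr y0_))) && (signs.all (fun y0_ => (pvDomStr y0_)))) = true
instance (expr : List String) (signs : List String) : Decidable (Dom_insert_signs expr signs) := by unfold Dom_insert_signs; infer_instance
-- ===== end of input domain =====

-- B first computes the eligible positions, maps the signs onto them with dict(zip(...)),
-- and then emits the output in a second pass by dictionary lookup — two staged passes
-- instead of A's single stateful loop with an op_index counter (objective: alternative).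

-- ===== PORT A =====
-- the for-loop over enumerate(expr) with state (out, op_index); the indexings
-- signs[op_index] and expr[idx+1] are guarded in range by the branch conditions,
-- so pyGetD with a default "" is exact.
def pvLoopA (expr signs : List String) : List (Int × String) → List String → Int → List String
  | [], out, _ => out
  | (idx, token) :: rest, out, op =>
    let out := out ++ [token]
    if op < (signs.length : Int) ∧ token ≠ "(" ∧
        (idx + 1 = (expr.length : Int) ∨ PySem.List.pyGetD expr (idx + 1) "" ≠ ")") then
      pvLoopA expr signs rest (out ++ [PySem.List.pyGetD signs op ""]) (op + 1)
    else
      pvLoopA expr signs rest out op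

def insert_signs (expr : List String) (signs : List String) : List String :=
  pvLoopA expr signs (PySem.List.enumerate expr 0) [] 0

-- ===== PORT B =====
-- the comprehension filter 'tok != "(" and (i + 1 == n or expr[i+1] != ")")';
-- expr[i+1] is only reached with i+1 < n (short-circuit), so pyGetD "" is exact.
def pvElig (expr : List String) (p : Int × String) : Bool :=
  p.2 != "(" && (p.1 + 1 == (expr.length : Int) || PySem.List.pyGetD expr (p.1 + 1) "" != ")")

def insert_signs_alt (expr : List String) (signs : List String) : List String :=
  let eligible : List Int := ((PySem.List.enumerate expr 0).filter (pvElig expr)).map Prod.fst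
  let signAt : PySem.Dict Int String := PySem.Dict.ofList (eligible.zip signs)
  (PySem.List.enumerate expr 0).flatMap (fun p =>
    match signAt.get? p.1 with
    | some s => [p.2, s]
    | none => [p.2])

-- ===== PRECONDITION & SPEC =====
def Spec_insert_signs (expr : List String) (signs : List String) (out : List String) : Prop := out = insert_signs_alt expr signs
instance (expr : List String) (signs : List String) (out : List String) : Decidable (Spec_insert_signs expr signs out) := by unfold Spec_insert_signs; infer_instance

-- ===== CLAIM (what is proved, stated in full; the proofs are below) =====
def Claim_equal_insert_signs : Prop := ∀ (expr : List String) (signs : List String), Dom_insert_signs expr signs → Spec_insert_signs expr signs (insert_signs expr signs)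

-- ===== LEMMAS AND PROOFS =====

-- Common reference shape: walk the (index, token) pairs, handing out the remaining
-- signs at the eligible positions.
def pvEmit (expr : List String) : List (Int × String) → List String → List String
  | [], _ => []
  | p :: rest, sr =>
    if pvElig expr p then
      match sr with
      | [] => p.2 :: pvEmit expr rest []
      | s :: ss => p.2 :: s :: pvEmit expr rest ss
    else p.2 :: pvEmit expr rest sr

-- Dict.ofList is the insert-fold; lookups through it:
lemma pv_get?_foldl_congr (tl : List (Int × String)) (d d' : PySem.Dict Int String) (j : Int)
    (h : d.get? j = d'.get? j) :
    (tl.foldl (fun d q => d.insert q.1 q.2) d).get? j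
      = (tl.foldl (fun d q => d.insert q.1 q.2) d').get? j := by
  induction tl generalizing d d' with
  | nil => exact h
  | cons q tl ih =>
    exact ih _ _ (by rw [PySem.Dict.get?_insert, PySem.Dict.get?_insert, h])

lemma pv_get?_foldl_of_not_mem (tl : List (Int × String)) (d : PySem.Dict Int String) (j : Int)
    (h : j ∉ tl.map Prod.fst) :
    (tl.foldl (fun d q => d.insert q.1 q.2) d).get? j = d.get? j := by
  induction tl generalizing d with
  | nil => rfl
  | cons q tl ih =>
    simp only [List.map_cons, List.mem_cons, not_or] at h
    rw [List.foldl_cons, ih _ h.2, PySem.Dict.get?_insert_of_ne _ _ h.1]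

lemma pv_get?_ofList_none (tl : List (Int × String)) (j : Int) (h : j ∉ tl.map Prod.fst) :
    (PySem.Dict.ofList tl).get? j = none := by
  show (tl.foldl (fun d q => d.insert q.1 q.2) PySem.Dict.empty).get? j = none
  rw [pv_get?_foldl_of_not_mem tl _ j h, PySem.Dict.get?_empty]

lemma pv_get?_ofList_cons_self (k : Int) (v : String) (tl : List (Int × String))
    (h : k ∉ tl.map Prod.fst) :
    (PySem.Dict.ofList ((k, v) :: tl)).get? k = some v := by
  show (tl.foldl (fun d q => d.insert q.1 q.2) (PySem.Dict.empty.insert k v)).get? k = some v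
  rw [pv_get?_foldl_of_not_mem tl _ k h, PySem.Dict.get?_insert_self]

lemma pv_get?_ofList_cons_ne (k : Int) (v : String) (tl : List (Int × String)) (j : Int)
    (h : j ≠ k) :
    (PySem.Dict.ofList ((k, v) :: tl)).get? j = (PySem.Dict.ofList tl).get? j := by
  show (tl.foldl (fun d q => d.insert q.1 q.2) (PySem.Dict.empty.insert k v)).get? j
      = (tl.foldl (fun d q => d.insert q.1 q.2) PySem.Dict.empty).get? j
  exact pv_get?_foldl_congr tl _ _ j (PySem.Dict.get?_insert_of_ne _ _ h)

-- A's loop equals pvEmit: op_index is exactly "how many signs have been consumed".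
lemma pvLoopA_eq_pvEmit (expr signs : List String) :
    ∀ (L : List (Int × String)) (out : List String) (op : Nat),
      pvLoopA expr signs L out (op : Int) = out ++ pvEmit expr L (signs.drop op) := by
  intro L
  induction L with
  | nil => intro out op; simp [pvLoopA, pvEmit]
  | cons p rest ih =>
    intro out op
    obtain ⟨idx, token⟩ := p
    rw [pvLoopA]
    rcases Nat.lt_or_ge op signs.length with hop | hop
    · rcases hs : signs.drop op with _ | ⟨s, ss⟩
      · exfalso
        have := List.length_drop (l := signs) (i := op)
        rw [hs] at this; simp at this; omega
      have hgets : PySem.List.pyGetD signs (op : Int) "" = s := by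
        rw [PySem.List.pyGetD_natCast, List.getD_eq_getElem?_getD, ← List.head?_drop, hs]; rfl
      have hss : signs.drop (op + 1) = ss := by
        rw [← List.drop_drop (l := signs) (i := 1) (j := op), hs]; rfl
      by_cases he : pvElig expr (idx, token) = true
      · simp only [pvElig, Bool.and_eq_true, bne_iff_ne, Bool.or_eq_true, beq_iff_eq] at he
        rw [if_pos ⟨by exact_mod_cast hop, he.1, by simpa using he.2⟩, hgets,
          show ((op : Int) + 1) = ((op + 1 : Nat) : Int) by push_cast; ring, ih _ (op + 1), hss]
        simp only [pvEmit]
        rw [if_pos (by simpa [pvElig] using he)]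
        simp
      · rw [if_neg (by
          rintro ⟨-, h1, h2⟩
          exact he (by simp [pvElig, h1]; simpa using h2))]
        rw [ih _ op, hs]
        simp only [pvEmit]
        rw [if_neg (by simpa [hs] using he)]
        simp
    · rw [if_neg (by rintro ⟨h1, -⟩; omega)]
      have hs : signs.drop op = [] := List.drop_eq_nil_of_le hop
      rw [ih _ op, hs]
      simp only [pvEmit]
      by_cases he : pvElig expr (idx, token) = true <;> simp [he]

-- B's second pass equals pvEmit: on a key-increasing pair list, looking the current
-- index up in dict(zip(eligible, signs)) yields exactly the next unconsumed sign.
lemma pvFlatMap_eq_pvEmit (expr : List String) :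
    ∀ (L : List (Int × String)) (sr : List String),
      L.Pairwise (fun p q => p.1 < q.1) →
      L.flatMap (fun p =>
          match (PySem.Dict.ofList (((L.filter (pvElig expr)).map Prod.fst).zip sr)).get? p.1 with
          | some s => [p.2, s]
          | none => [p.2]) = pvEmit expr L sr := by
  intro L
  induction L with
  | nil => intro sr _; simp [pvEmit]
  | cons p rest ih =>
    intro sr hpw
    rw [List.pairwise_cons] at hpw
    have hgt : ∀ (j : Int) (sr' : List String), j ∈ (((rest.filter (pvElig expr)).map Prod.fst).zip sr').map Prod.fst → p.1 < j := by
      intro j sr' hj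
      obtain ⟨q, hq, rfl⟩ := List.mem_map.mp hj
      obtain ⟨k, v⟩ := q
      obtain ⟨q', hq', rfl⟩ := List.mem_map.mp (List.of_mem_zip hq).1
      exact hpw.1 q' (List.mem_of_mem_filter hq')
    rw [List.flatMap_cons]
    by_cases he : pvElig expr p = true
    · rw [List.filter_cons_of_pos he]
      rcases sr with _ | ⟨s, ss⟩
      · -- no signs left: both zips are empty, every lookup misses
        simp only [List.zip_nil_right]
        rw [pv_get?_ofList_none [] p.1 (by simp)]
        have hre := ih [] hpw.2
        simp only [List.zip_nil_right] at hre
        rw [hre]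
        simp [pvEmit, he]
      · simp only [List.map_cons, List.zip_cons_cons]
        rw [pv_get?_ofList_cons_self p.1 s _
          (fun hmem => absurd (hgt p.1 ss hmem) (lt_irrefl p.1))]
        rw [List.flatMap_congr (l := rest) (g := fun q =>
            match (PySem.Dict.ofList (((rest.filter (pvElig expr)).map Prod.fst).zip ss)).get? q.1 with
            | some s => [q.2, s]
            | none => [q.2]) (fun q hq => by
          rw [pv_get?_ofList_cons_ne p.1 s _ q.1 (ne_of_gt (hpw.1 q hq))])]
        rw [ih ss hpw.2]
        simp [pvEmit, he]
    · rw [List.filter_cons_of_neg he]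
      rw [pv_get?_ofList_none _ p.1
        (fun hmem => absurd (hgt p.1 sr hmem) (lt_irrefl p.1))]
      rw [ih sr hpw.2]
      simp [pvEmit, he]

-- ===== VERDICT (by name: the statement is the Claim_ definition above) =====
theorem insert_signs_spec : Claim_equal_insert_signs := by
  intro expr signs _
  show insert_signs expr signs = insert_signs_alt expr signs
  unfold insert_signs insert_signs_alt
  rw [pvFlatMap_eq_pvEmit expr (PySem.List.enumerate expr 0) signs
    (PySem.List.pairwise_lt_enumerate expr 0)]
  have := pvLoopA_eq_pvEmit expr signs (PySem.List.enumerate expr 0) [] 0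
  simpa using this
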